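-- pv_equiv track=rewrite | github.com/pabloojp/Prueba | PROGRAMAS/microsoft_malware_clasiffication/CNN/RECONOCIMIENTO SEÑALES/pruebasModelo.py | generar_listas
-- ===== SOURCE A (Python) =====
-- def generar_listas(N, LISTA):
--     resultado = []
--     inicio = 0
--
--     for longitud in LISTA:
--         nueva_lista = list(range(inicio, inicio + longitud))
--         resultado.append(nueva_lista)
--         inicio += longitud
--
--     return resultado
-- ===== SOURCE B (Python) =====
-- def generar_listas(N, LISTA):
--     # boundary table (prefix sums), then one pass over adjacent boundary pairs
--     bounds = [0]
--     for x in LISTA: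
--         bounds.append(bounds[-1] + x)
--     return [list(range(a, b)) for a, b in zip(bounds, bounds[1:])]
-- ===== Notes on version B (the rewrite author's own statement) =====
-- stated objective: alternative
-- what changed: B first materializes the partition boundaries as a prefix-sum table and then builds each chunk from adjacent boundary pairs, instead of threading a running 'inicio' accumulator while appending.
import Mathlib
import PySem

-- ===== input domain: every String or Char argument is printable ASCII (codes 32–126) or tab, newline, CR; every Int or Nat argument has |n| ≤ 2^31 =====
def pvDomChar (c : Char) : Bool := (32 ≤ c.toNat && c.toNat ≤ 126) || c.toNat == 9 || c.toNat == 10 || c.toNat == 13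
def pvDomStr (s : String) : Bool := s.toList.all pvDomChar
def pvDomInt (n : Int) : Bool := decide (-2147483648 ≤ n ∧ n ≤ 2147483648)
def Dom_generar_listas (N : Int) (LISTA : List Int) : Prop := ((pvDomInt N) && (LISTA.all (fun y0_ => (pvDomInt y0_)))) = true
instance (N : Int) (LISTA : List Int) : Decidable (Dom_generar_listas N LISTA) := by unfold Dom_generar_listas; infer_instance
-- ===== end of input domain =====

-- B builds the partition boundaries as a prefix-sum table and maps over adjacent boundary pairs, instead of threading a running start accumulator (alternative decomposition, same cost).


-- ===== PORT A =====
def generar_listas (N : Int) (LISTA : List Int) : List (List Int) :=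
  (LISTA.foldl
    (fun (st : List (List Int) × Int) longitud =>
      (st.1 ++ [PySem.List.pyRange st.2 (st.2 + longitud) 1], st.2 + longitud))
    ([], 0)).1

-- ===== PORT B =====
-- B: prefix-sum boundary table (List.scanl = Source B's accumulation loop), then a map over adjacent pairs
def generar_listas_alt (N : Int) (LISTA : List Int) : List (List Int) :=
  let bounds := List.scanl (· + ·) 0 LISTA
  (bounds.zip bounds.tail).map (fun p => PySem.List.pyRange p.1 p.2 1)

-- ===== PRECONDITION & SPEC =====
def Spec_generar_listas (N : Int) (LISTA : List Int) (out : List (List Int)) : Prop := out = generar_listas_alt N LISTA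
instance (N : Int) (LISTA : List Int) (out : List (List Int)) : Decidable (Spec_generar_listas N LISTA out) := by unfold Spec_generar_listas; infer_instance

-- ===== CLAIM (what is proved, stated in full; the proofs are below) =====
def Claim_equal_generar_listas : Prop := ∀ (N : Int) (LISTA : List Int), Dom_generar_listas N LISTA → Spec_generar_listas N LISTA (generar_listas N LISTA)

-- ===== LEMMAS AND PROOFS =====

-- ===== VERDICT (by name: the statement is the Claim_ definition above) =====
def pvRanges (inicio : Int) : List Int → List (List Int)
  | [] => []
  | x :: xs => PySem.List.pyRange inicio (inicio + x) 1 :: pvRanges (inicio + x) xs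

lemma gl_fold (LISTA : List Int) (acc : List (List Int)) (inicio : Int) :
    (LISTA.foldl
      (fun (st : List (List Int) × Int) longitud =>
        (st.1 ++ [PySem.List.pyRange st.2 (st.2 + longitud) 1], st.2 + longitud))
      (acc, inicio)).1
    = acc ++ pvRanges inicio LISTA := by
  induction LISTA generalizing acc inicio with
  | nil => simp [pvRanges]
  | cons x xs ih => simp [List.foldl, pvRanges, ih]

lemma gl_scanl (LISTA : List Int) (inicio : Int) :
    ((List.scanl (· + ·) inicio LISTA).zip
      (List.scanl (· + ·) inicio LISTA).tail).map
        (fun p => PySem.List.pyRange p.1 p.2 1)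
    = pvRanges inicio LISTA := by
  induction LISTA generalizing inicio with
  | nil => simp [List.scanl, pvRanges]
  | cons x xs ih =>
      cases xs with
      | nil => simp [List.scanl, pvRanges]
      | cons y ys =>
          simp only [List.scanl_cons, List.tail_cons, List.zip, List.zipWith, List.map,
            pvRanges]
          have h := ih (inicio + x)
          simp only [List.scanl_cons, List.tail_cons, List.zip] at h
          exact congrArg _ h

theorem generar_listas_spec : Claim_equal_generar_listas := by
  intro N LISTA _
  unfold Spec_generar_listas generar_listas generar_listas_alt
  rw [gl_fold LISTA [] 0]
  simp [gl_scanl]
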